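-- pv_equiv track=rewrite | github.com/ghghang2/v1.5 | nbchat/core/compaction.py | _group_into_turns
-- ===== SOURCE A (Python) =====
-- from typing import List, Tuple, Optional
--
-- _Row = Tuple[str, str, str, str, str]
--
-- def _group_into_turns(history: List[_Row]) -> List[List[_Row]]:
--     turns: List[List[_Row]] = []
--     current: List[_Row] = []
--     for row in history:
--         if row[0] == "user" and current:
--             turns.append(current)
--             current = []
--         current.append(row)
--     if current:
--         turns.append(current)
--     return turns
-- ===== SOURCE B (Python) =====
-- from typing import List, Tuple
--
-- _Row = Tuple[str, str, str, str, str]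
--
-- def _group_into_turns(history: List[_Row]) -> List[List[_Row]]:
--     # Index-then-slice decomposition: each turn starts at a cut point and
--     # runs up to (not including) the next "user" row after it.
--     turns: List[List[_Row]] = []
--     n = len(history)
--     i = 0
--     while i < n:
--         j = i + 1
--         while j < n and history[j][0] != "user":
--             j += 1
--         turns.append(history[i:j])
--         i = j
--     return turns
-- ===== Notes on version B (the rewrite author's own statement) =====
-- stated objective: alternative
-- what changed: Replaces the interleaved accumulate-and-flush loop (mutable `current` buffer flushed on each later 'user' row) with an index-then-slice decomposition: scan forward to the next 'user' boundary and slice the turn out directly.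
import Mathlib
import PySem

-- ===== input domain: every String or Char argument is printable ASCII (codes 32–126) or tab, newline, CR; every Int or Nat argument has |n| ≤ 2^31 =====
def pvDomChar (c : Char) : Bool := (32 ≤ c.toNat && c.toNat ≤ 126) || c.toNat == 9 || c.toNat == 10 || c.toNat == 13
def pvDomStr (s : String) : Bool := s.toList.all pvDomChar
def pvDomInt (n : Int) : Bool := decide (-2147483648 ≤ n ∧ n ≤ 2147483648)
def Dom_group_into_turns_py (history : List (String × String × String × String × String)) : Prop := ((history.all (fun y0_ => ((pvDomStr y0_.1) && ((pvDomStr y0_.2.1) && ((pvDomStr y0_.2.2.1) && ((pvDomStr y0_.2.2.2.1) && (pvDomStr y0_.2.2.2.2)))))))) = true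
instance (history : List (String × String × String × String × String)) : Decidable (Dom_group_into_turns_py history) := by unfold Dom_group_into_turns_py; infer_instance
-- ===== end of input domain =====

-- B replaces A's accumulate-and-flush loop by an index-then-slice decomposition (same cost; objective: alternative).

-- ===== PORT A =====
-- the for-loop over `history` with state (turns, current); flush `current` on a "user" row when non-empty
def pvALoop (turns : List (List (String × String × String × String × String)))
    (current : List (String × String × String × String × String)) :
    List (String × String × String × String × String) →
    List (List (String × String × String × String × String)) × List (String × String × String × String × String)
  | [] => (turns, current)
  | row :: rest =>
    let st := if row.1 == "user" && !current.isEmpty then (turns ++ [current], ([] : List (String × String × String × String × String))) else (turns, current)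
    pvALoop st.1 (st.2 ++ [row]) rest

def group_into_turns_py (history : List (String × String × String × String × String)) : List (List (String × String × String × String × String)) :=
  let st := pvALoop [] [] history
  if !st.2.isEmpty then st.1 ++ [st.2] else st.1

-- ===== PORT B =====
-- outer while over the remaining suffix: the inner while finds the next "user" row after position i,
-- the slice history[i:j] is the head row plus the non-"user" rows after it; i := j advances to the rest
def group_into_turns_py_alt (history : List (String × String × String × String × String)) : List (List (String × String × String × String × String)) :=
  match history with
  | [] => []
  | r :: rest =>
    (r :: rest.takeWhile (fun x => !(x.1 == "user"))) ::
      group_into_turns_py_alt (rest.dropWhile (fun x => !(x.1 == "user")))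
termination_by history.length
decreasing_by
  have := List.length_dropWhile_le (p := fun x => !(x.1 == "user")) (l := rest)
  simp; omega

-- ===== PRECONDITION & SPEC =====
def Spec_group_into_turns_py (history : List (String × String × String × String × String)) (out : List (List (String × String × String × String × String))) : Prop := out = group_into_turns_py_alt history
instance (history : List (String × String × String × String × String)) (out : List (List (String × String × String × String × String))) : Decidable (Spec_group_into_turns_py history out) := by unfold Spec_group_into_turns_py; infer_instance

-- ===== CLAIM (what is proved, stated in full; the proofs are below) =====
def Claim_equal_group_into_turns_py : Prop := ∀ (history : List (String × String × String × String × String)), Dom_group_into_turns_py history → Spec_group_into_turns_py history (group_into_turns_py history)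

-- ===== LEMMAS AND PROOFS =====

@[simp] theorem pvAlt_nil : group_into_turns_py_alt [] = [] := by
  rw [group_into_turns_py_alt]

@[simp] theorem pvAlt_cons (r : String × String × String × String × String)
    (rest : List (String × String × String × String × String)) :
    group_into_turns_py_alt (r :: rest) =
      (r :: rest.takeWhile (fun x => !(x.1 == "user"))) ::
        group_into_turns_py_alt (rest.dropWhile (fun x => !(x.1 == "user"))) := by
  rw [group_into_turns_py_alt]

-- finalisation of A's loop state, as A does after the loop
def pvFinish (st : List (List (String × String × String × String × String)) × List (String × String × String × String × String)) :
    List (List (String × String × String × String × String)) :=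
  if !st.2.isEmpty then st.1 ++ [st.2] else st.1

-- Invariant: with a non-empty `current`, A's loop finishes as `turns` followed by the turn
-- `current ++ takeWhile non-user` and then B's grouping of the remaining suffix.
theorem pvALoop_invariant (rest : List (String × String × String × String × String)) :
    ∀ (turns : List (List (String × String × String × String × String)))
      (current : List (String × String × String × String × String)), current ≠ [] →
    pvFinish (pvALoop turns current rest) =
      turns ++ (current ++ rest.takeWhile (fun x => !(x.1 == "user"))) ::
        group_into_turns_py_alt (rest.dropWhile (fun x => !(x.1 == "user"))) := by
  induction rest with
  | nil =>
    intro turns current hc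
    simp [pvALoop, pvFinish, hc]
  | cons row rest ih =>
    intro turns current hc
    by_cases hu : row.1 = "user"
    · have hne : current.isEmpty = false := by simpa [List.isEmpty_iff] using hc
      rw [show pvALoop turns current (row :: rest) = pvALoop (turns ++ [current]) [row] rest by
        simp [pvALoop, hu, hne]]
      rw [ih (turns ++ [current]) [row] (by simp)]
      simp [List.takeWhile, List.dropWhile, hu]
    · rw [show pvALoop turns current (row :: rest) = pvALoop turns (current ++ [row]) rest by
        simp [pvALoop, hu]]
      rw [ih turns (current ++ [row]) (by simp)]
      have hb : (row.1 == "user") = false := by simp [hu]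
      simp [List.takeWhile, List.dropWhile, hb]

-- ===== VERDICT (by name: the statement is the Claim_ definition above) =====
theorem group_into_turns_py_spec : Claim_equal_group_into_turns_py := by
  intro history _
  unfold Spec_group_into_turns_py
  cases history with
  | nil => simp [group_into_turns_py, pvALoop]
  | cons r rest =>
    show pvFinish (pvALoop [] [] (r :: rest)) = _
    rw [show pvALoop [] [] (r :: rest) = pvALoop [] [r] rest by simp [pvALoop]]
    rw [pvALoop_invariant rest [] [r] (by simp)]
    simp
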